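-- pv_equiv track=rewrite | github.com/aesthetic0001/competitive-programming | notes/rolling_stringhash_substring.py | rolling_hash
-- ===== SOURCE A (Python) =====
-- modulo = 1000000007
--
-- base = 31
--
-- def rolling_hash(target: str) -> list[int]:
--     result = [0]
--     power = 1
--     hashresult = 0
--     for char in target:
--         mapping = ord(char) - ord('a') + 1
--         mapping *= power
--         mapping %= modulo
--         power *= base
--         power %= modulo
--         hashresult += mapping
--         hashresult %= modulo
--         result.append(hashresult);
--
--     return result
-- ===== SOURCE B (Python) =====
-- modulo = 1000000007
--
-- base = 31
--
-- def rolling_hash(target: str) -> list[int]: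
--     # Divide and conquer: the prefix hashes of s = L + R are the prefix hashes
--     # of L, followed by (hash(L) + base**len(L) * h) % modulo for every
--     # nonempty-prefix hash h of R.
--     def mpow(e):
--         r = 1
--         for _ in range(e):
--             r = r * base % modulo
--         return r
--
--     def go(s):
--         if len(s) == 0:
--             return [0]
--         if len(s) == 1:
--             return [0, (ord(s) - ord('a') + 1) % modulo]
--         mid = len(s) // 2
--         left = go(s[:mid])
--         right = go(s[mid:])
--         shift = left[-1]
--         pw = mpow(mid)
--         return left + [(shift + pw * h) % modulo for h in right[1:]]
--
--     return go(target)
-- ===== Notes on version B (the rewrite author's own statement) =====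
-- stated objective: alternative
-- what changed: Replaces A's single forward pass with a power accumulator and running prefix sum by divide and conquer: recursively hash the two halves of the string and merge with prefix_hashes(L+R) = prefix_hashes(L) followed by (hash(L) + base**len(L) * h) % modulo for each nonempty-prefix hash h of R.
import Mathlib
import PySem

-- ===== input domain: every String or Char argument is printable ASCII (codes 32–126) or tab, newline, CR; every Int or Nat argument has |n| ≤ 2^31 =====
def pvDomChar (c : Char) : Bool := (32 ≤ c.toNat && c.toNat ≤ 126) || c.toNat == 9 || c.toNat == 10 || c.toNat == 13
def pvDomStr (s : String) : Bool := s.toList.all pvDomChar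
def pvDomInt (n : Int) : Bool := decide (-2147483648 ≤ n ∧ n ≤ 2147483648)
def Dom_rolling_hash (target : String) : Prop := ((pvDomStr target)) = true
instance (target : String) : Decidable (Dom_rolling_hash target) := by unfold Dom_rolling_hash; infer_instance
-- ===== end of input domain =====

-- B replaces A's forward accumulator/power loop by divide and conquer on the string:
-- prefix hashes of L ++ R = prefix hashes of L, then hash(L) + base^|L| * (each hash of R);
-- alternative algorithm, same result.

-- ===== PORT A =====
-- the Python loop, state (result, power, hashresult) carried through the characters
def pvLoopA : List Char → List Int → Int → Int → List Int
  | [], result, _, _ => result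
  | c :: cs, result, power, hashresult =>
    let mapping := PySem.Int.mod (((c.toNat : Int) - 97 + 1) * power) 1000000007
    let power' := PySem.Int.mod (power * 31) 1000000007
    let hashresult' := PySem.Int.mod (hashresult + mapping) 1000000007
    pvLoopA cs (result ++ [hashresult']) power' hashresult'

def rolling_hash (target : String) : List Int :=
  pvLoopA target.toList [0] 1 0

-- ===== PORT B =====
-- Source B's mpow(e): e-fold modular multiplication by base
def pvPow : Nat → Int
  | 0 => 1
  | e + 1 => PySem.Int.mod (pvPow e * 31) 1000000007

-- Source B's go(s); s[:mid]/s[mid:] with 0 ≤ mid ≤ len(s) are exactly take/drop,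
-- s[-1] of the always-nonempty left list is getLastD 0, right[1:] is drop 1
def pvGo : List Char → List Int
  | [] => [0]
  | [c] => [0, PySem.Int.mod ((c.toNat : Int) - 97 + 1) 1000000007]
  | c1 :: c2 :: rest =>
    let mid := (c1 :: c2 :: rest).length / 2
    let left := pvGo ((c1 :: c2 :: rest).take mid)
    let right := pvGo ((c1 :: c2 :: rest).drop mid)
    left ++ (right.drop 1).map
      (fun h => PySem.Int.mod (left.getLastD 0 + pvPow mid * h) 1000000007)
termination_by s => s.length
decreasing_by
  · simp [List.length_take]; omega
  · simp [List.length_drop]; omega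

def rolling_hash_alt (target : String) : List Int :=
  pvGo target.toList

-- ===== PRECONDITION & SPEC =====
def Spec_rolling_hash (target : String) (out : List Int) : Prop := out = rolling_hash_alt target
instance (target : String) (out : List Int) : Decidable (Spec_rolling_hash target out) := by unfold Spec_rolling_hash; infer_instance

-- ===== CLAIM (what is proved, stated in full; the proofs are below) =====
def Claim_equal_rolling_hash : Prop := ∀ (target : String), Dom_rolling_hash target → Spec_rolling_hash target (rolling_hash target)

-- ===== LEMMAS AND PROOFS =====

theorem pvmod (a : Int) : PySem.Int.mod a 1000000007 = a % 1000000007 :=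
  PySem.Int.mod_eq_emod_of_pos (by norm_num)

-- reference function: Horner recursion producing the prefix-hash list
def pvB : List Char → List Int
  | [] => [0]
  | c :: cs =>
    0 :: (pvB cs).map (fun h => PySem.Int.mod (((c.toNat : Int) - 97 + 1) + 31 * h) 1000000007)

theorem pvB_cons (cs : List Char) : ∃ t, pvB cs = 0 :: t := by
  cases cs <;> exact ⟨_, rfl⟩

theorem pvB_ne_nil (cs : List Char) : pvB cs ≠ [] := by
  obtain ⟨t, ht⟩ := pvB_cons cs; simp [ht]

theorem pvB_bounds (cs : List Char) : ∀ x ∈ pvB cs, 0 ≤ x ∧ x < 1000000007 := by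
  induction cs with
  | nil => intro x hx; simp [pvB] at hx; omega
  | cons c cs ih =>
    intro x hx
    simp only [pvB, List.mem_cons, List.mem_map, pvmod] at hx
    rcases hx with h0 | ⟨y, _, rfl⟩
    · omega
    · exact ⟨Int.emod_nonneg _ (by norm_num), Int.emod_lt_of_pos _ (by norm_num)⟩

theorem pvMod_head (h p v : Int) :
    (h + p * ((v + 31 * 0) % 1000000007)) % 1000000007
      = (h + v * p % 1000000007) % 1000000007 := by
  have b : ∀ a : Int, a % 1000000007 ≡ a [ZMOD 1000000007] :=
    fun a => Int.emod_emod_of_dvd a dvd_rfl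
  have l : h + p * ((v + 31 * 0) % 1000000007) ≡ h + p * (v + 31 * 0) [ZMOD 1000000007] :=
    Int.ModEq.add_left h ((b _).mul_left p)
  have r : h + v * p % 1000000007 ≡ h + v * p [ZMOD 1000000007] :=
    Int.ModEq.add_left h (b _)
  have e : h + p * (v + 31 * 0) = h + v * p := by ring
  exact (l.trans (e ▸ Int.ModEq.refl _)).trans r.symm

theorem pvMod_step (h p v x : Int) :
    (h + p * ((v + 31 * x) % 1000000007)) % 1000000007
      = ((h + v * p % 1000000007) % 1000000007
          + p * 31 % 1000000007 * x) % 1000000007 := by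
  have b : ∀ a : Int, a % 1000000007 ≡ a [ZMOD 1000000007] :=
    fun a => Int.emod_emod_of_dvd a dvd_rfl
  have l : h + p * ((v + 31 * x) % 1000000007) ≡ h + p * (v + 31 * x) [ZMOD 1000000007] :=
    Int.ModEq.add_left h ((b _).mul_left p)
  have r1 : (h + v * p % 1000000007) % 1000000007 ≡ h + v * p [ZMOD 1000000007] :=
    (b _).trans (Int.ModEq.add_left h (b _))
  have r2 : p * 31 % 1000000007 * x ≡ p * 31 * x [ZMOD 1000000007] :=
    (b _).mul_right x
  have e : h + p * (v + 31 * x) = h + v * p + p * 31 * x := by ring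
  exact (l.trans (e ▸ Int.ModEq.refl _)).trans (r1.add r2).symm

-- prepending one character commutes with the affine shift of the combine step
theorem pvMod_merge (v last P h : Int) :
    (v + 31 * ((last + P * h) % 1000000007)) % 1000000007
      = ((v + 31 * last) % 1000000007 + P * 31 % 1000000007 * h) % 1000000007 := by
  have b : ∀ a : Int, a % 1000000007 ≡ a [ZMOD 1000000007] :=
    fun a => Int.emod_emod_of_dvd a dvd_rfl
  have l : v + 31 * ((last + P * h) % 1000000007) ≡ v + 31 * (last + P * h) [ZMOD 1000000007] :=
    Int.ModEq.add_left v ((b _).mul_left 31)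
  have r : (v + 31 * last) % 1000000007 + P * 31 % 1000000007 * h
      ≡ (v + 31 * last) + P * 31 * h [ZMOD 1000000007] :=
    (b _).add ((b _).mul_right h)
  have e : v + 31 * (last + P * h) = (v + 31 * last) + P * 31 * h := by ring
  exact (l.trans (e ▸ Int.ModEq.refl _)).trans r.symm

-- A's loop produces the Horner list, shifted by the affine map (hashresult, power)
theorem pvLoopA_eq (cs : List Char) :
    ∀ (result : List Int) (power hashresult : Int),
      pvLoopA cs result power hashresult
        = result ++ (pvB cs).tail.map
            (fun x => (hashresult + power * x) % 1000000007) := by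
  induction cs with
  | nil => intro result power hashresult; simp [pvLoopA, pvB]
  | cons c cs ih =>
    intro result power hashresult
    obtain ⟨t, ht⟩ := pvB_cons cs
    simp only [pvLoopA, ih, pvB, ht, pvmod, List.tail_cons, List.map_cons, List.map_map,
      List.append_assoc, List.singleton_append]
    congr 1
    refine List.ext_getElem (by simp) ?_
    intro i hi _
    cases i with
    | zero => simpa using (pvMod_head hashresult power ((c.toNat : Int) - 97 + 1)).symm
    | succ j =>
      simp only [List.getElem_cons_succ, List.getElem_map, Function.comp]
      exact (pvMod_step hashresult power ((c.toNat : Int) - 97 + 1) _).symm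

theorem pvGetLastD_map (f : Int → Int) (l : List Int) (h : l ≠ []) :
    (l.map f).getLastD 0 = f (l.getLastD 0) := by
  rw [List.getLastD_eq_getLast?, List.getLastD_eq_getLast?, List.getLast?_map]
  cases e : l.getLast? with
  | none => exact absurd (List.getLast?_eq_none_iff.mp e) h
  | some a => simp

-- the divide-and-conquer combine law for the Horner list
theorem pvB_split (r : List Char) :
    ∀ l : List Char,
      pvB (l ++ r) = pvB l ++ (pvB r).tail.map
        (fun h => PySem.Int.mod ((pvB l).getLastD 0 + pvPow l.length * h) 1000000007) := by
  intro l
  induction l with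
  | nil =>
    obtain ⟨t, ht⟩ := pvB_cons r
    have hb := pvB_bounds r
    rw [ht] at hb
    simp only [List.nil_append, ht, pvB, pvPow, List.tail_cons, List.length_nil,
      List.getLastD_cons, List.getLastD_nil, pvmod]
    refine congrArg (0 :: ·) ((List.map_congr_left fun x hx => ?_).trans (List.map_id t)).symm
    have := hb x (List.mem_cons_of_mem _ hx)
    simpa using Int.emod_eq_of_lt this.1 this.2
  | cons c l ih =>
    obtain ⟨tr, htr⟩ := pvB_cons r
    simp only [List.cons_append, pvB, ih, List.map_append, List.map_map, List.length_cons,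
      List.cons_append, pvmod, pvPow]
    have hlast : (0 :: List.map (fun h => (((c.toNat : Int) - 97 + 1) + 31 * h) % 1000000007) (pvB l)).getLastD 0
        = (((c.toNat : Int) - 97 + 1) + 31 * ((pvB l).getLastD 0)) % 1000000007 := by
      rw [List.getLastD_cons, pvGetLastD_map _ _ (pvB_ne_nil l)]
    rw [hlast]
    refine congrArg (0 :: ·) (congrArg (_ ++ ·) (List.map_congr_left fun h _ => ?_))
    exact pvMod_merge _ _ _ _

theorem pvGo_eq (s : List Char) : pvGo s = pvB s := by
  induction s using pvGo.induct with
  | case1 => simp [pvGo, pvB]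
  | case2 c => simp [pvGo, pvB]
  | case3 c1 c2 rest mid ih1 ih2 =>
    rw [pvGo]
    have e : mid = (c1 :: c2 :: rest).length / 2 := rfl
    rw [e] at ih1 ih2
    rw [ih1, ih2]
    have hlen : ((c1 :: c2 :: rest).take ((c1 :: c2 :: rest).length / 2)).length
        = (c1 :: c2 :: rest).length / 2 := by
      simp [List.length_take]; omega
    conv_rhs => rw [← List.take_append_drop ((c1 :: c2 :: rest).length / 2) (c1 :: c2 :: rest)]
    rw [pvB_split, hlen, List.drop_one]

theorem pvA_eq (target : String) : rolling_hash target = pvB target.toList := by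
  rw [rolling_hash, pvLoopA_eq]
  obtain ⟨t, ht⟩ := pvB_cons target.toList
  have hb := pvB_bounds target.toList
  rw [ht] at hb ⊢
  simp only [List.tail_cons, List.singleton_append]
  refine congrArg (0 :: ·) ?_
  refine (List.map_congr_left fun x hx => ?_).trans (List.map_id t)
  have := hb x (List.mem_cons_of_mem _ hx)
  simpa using Int.emod_eq_of_lt this.1 this.2

-- ===== VERDICT (by name: the statement is the Claim_ definition above) =====
theorem rolling_hash_spec : Claim_equal_rolling_hash := by
  intro target _
  show _ = _
  rw [pvA_eq, rolling_hash_alt, pvGo_eq]
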